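-- pv_equiv track=rewrite | github.com/Matrix-aas/srclight-pro-max | src/srclight/indexer.py | _strip_js_comments
-- ===== SOURCE A (Python) =====
-- def _strip_js_comments(text: str) -> str:
--     """Remove obvious JS/TS comments before regex-based signal extraction."""
--     out: list[str] = []
--     i = 0
--     in_single = False
--     in_double = False
--     in_template = False
--     in_line_comment = False
--     in_block_comment = False
--     escaped = False
--
--     while i < len(text):
--         ch = text[i]
--         nxt = text[i + 1] if i + 1 < len(text) else ""
--
--         if in_line_comment:
--             if ch == "\n":
--                 in_line_comment = False
--                 out.append(ch)
--             else:
--                 out.append(" ")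
--             i += 1
--             continue
--
--         if in_block_comment:
--             if ch == "*" and nxt == "/":
--                 out.extend((" ", " "))
--                 in_block_comment = False
--                 i += 2
--             else:
--                 out.append("\n" if ch == "\n" else " ")
--                 i += 1
--             continue
--
--         if in_single or in_double or in_template:
--             out.append(ch)
--             if escaped:
--                 escaped = False
--             elif ch == "\\":
--                 escaped = True
--             elif in_single and ch == "'":
--                 in_single = False
--             elif in_double and ch == '"':
--                 in_double = False
--             elif in_template and ch == "`":
--                 in_template = False
--             i += 1
--             continue
--
--         if ch == "/" and nxt == "/":
--             out.extend((" ", " "))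
--             in_line_comment = True
--             i += 2
--             continue
--         if ch == "/" and nxt == "*":
--             out.extend((" ", " "))
--             in_block_comment = True
--             i += 2
--             continue
--         if ch == "'":
--             in_single = True
--             out.append(ch)
--             i += 1
--             continue
--         if ch == '"':
--             in_double = True
--             out.append(ch)
--             i += 1
--             continue
--         if ch == "`":
--             in_template = True
--             out.append(ch)
--             i += 1
--             continue
--
--         out.append(ch)
--         i += 1
--
--     return "".join(out)
-- ===== SOURCE B (Python) =====
-- def _strip_js_comments(text: str) -> str:
--     """Chunk-copy scanner: jump between delimiters with str.find instead of a per-char state machine."""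
--     out: list[str] = []
--     n = len(text)
--     i = 0
--     while i < n:
--         # locate the next delimiter; copy the inert run before it verbatim in one append
--         j = n
--         for d in ("/", "'", '"', "`"):
--             m = text.find(d, i)
--             if m != -1 and m < j:
--                 j = m
--         out.append(text[i:j])
--         if j >= n:
--             break
--         ch = text[j]
--         if ch == "/":
--             if text.startswith("//", j):
--                 k = text.find("\n", j + 2)
--                 if k == -1:
--                     out.append(" " * (n - j))
--                     i = n
--                 else:
--                     out.append(" " * (k - j))
--                     out.append("\n")
--                     i = k + 1
--             elif text.startswith("/*", j):
--                 k = text.find("*/", j + 2)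
--                 if k == -1:
--                     seg, i, closer = text[j + 2:], n, ""
--                 else:
--                     seg, i, closer = text[j + 2:k], k + 2, "  "
--                 fill = "\n".join(" " * len(part) for part in seg.split("\n"))
--                 out.append("  " + fill + closer)
--             else:
--                 out.append("/")
--                 i = j + 1
--         else:
--             # string/template literal: step to the matching unescaped terminator, copy verbatim
--             s = j + 1
--             while s < n:
--                 c = text[s]
--                 if c == "\\":
--                     s += 2
--                 elif c == ch:
--                     s += 1
--                     break
--                 else:
--                     s += 1
--             e = min(s, n)
--             out.append(text[j:e])
--             i = e
--     return "".join(out)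
-- ===== Notes on version B (the rewrite author's own statement) =====
-- stated objective: faster
-- what changed: Replaced the six-boolean per-character state machine by a chunk scanner that uses str.find to copy delimiter-free runs, whole string/template literals and comment fills as blocks.
import Mathlib
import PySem

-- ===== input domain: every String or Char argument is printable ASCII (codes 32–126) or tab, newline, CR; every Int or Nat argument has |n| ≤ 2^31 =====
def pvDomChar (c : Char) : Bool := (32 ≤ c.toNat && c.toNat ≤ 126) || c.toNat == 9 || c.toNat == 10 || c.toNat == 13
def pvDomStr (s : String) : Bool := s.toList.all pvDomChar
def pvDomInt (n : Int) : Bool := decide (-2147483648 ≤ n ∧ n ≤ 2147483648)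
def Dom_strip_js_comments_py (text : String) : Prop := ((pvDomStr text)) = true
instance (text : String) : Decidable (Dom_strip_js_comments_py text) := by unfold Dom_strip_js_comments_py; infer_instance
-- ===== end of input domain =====

-- B replaces A's six-boolean per-character state machine by a chunk scanner that copies
-- delimiter-free runs, comment fills and whole string literals as blocks (objective: faster, constant-factor).

-- ===== PORT A =====
-- Literal port of A's while-loop: one step per character, the six state booleans as parameters.
def pvLoopA (cs : List Char) (s d t lc bc esc : Bool) : List Char :=
  match cs with
  | [] => []
  | ch :: rest =>
    if lc then
      if ch = '\n' then '\n' :: pvLoopA rest s d t false bc esc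
      else ' ' :: pvLoopA rest s d t lc bc esc
    else if bc then
      if ch = '*' ∧ rest.head? = some '/' then
        ' ' :: ' ' :: pvLoopA rest.tail s d t lc false esc
      else (if ch = '\n' then '\n' else ' ') :: pvLoopA rest s d t lc bc esc
    else if s || d || t then
      ch ::
        (if esc then pvLoopA rest s d t lc bc false
         else if ch = '\\' then pvLoopA rest s d t lc bc true
         else if s ∧ ch = '\'' then pvLoopA rest false d t lc bc esc
         else if d ∧ ch = '"' then pvLoopA rest s false t lc bc esc
         else if t ∧ ch = '`' then pvLoopA rest s d false lc bc esc
         else pvLoopA rest s d t lc bc esc)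
    else if ch = '/' ∧ rest.head? = some '/' then
      ' ' :: ' ' :: pvLoopA rest.tail s d t true bc esc
    else if ch = '/' ∧ rest.head? = some '*' then
      ' ' :: ' ' :: pvLoopA rest.tail s d t lc true esc
    else if ch = '\'' then ch :: pvLoopA rest true d t lc bc esc
    else if ch = '"' then ch :: pvLoopA rest s true t lc bc esc
    else if ch = '`' then ch :: pvLoopA rest s d true lc bc esc
    else ch :: pvLoopA rest s d t lc bc esc
termination_by cs.length
decreasing_by all_goals simp [List.length_tail]

def strip_js_comments_py (text : String) : String :=
  String.mk (pvLoopA text.toList false false false false false false)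

-- ===== PORT B =====
def pvDelim (c : Char) : Bool := c == '/' || c == '\'' || c == '"' || c == '`'

-- port of Source B's string-literal scan: copy up to and including the matching unescaped quote
def pvStrScan (q : Char) : List Char → List Char × List Char
  | [] => ([], [])
  | c :: r =>
    if c = '\\' then
      match r with
      | [] => (['\\'], [])
      | c2 :: r2 => let p := pvStrScan q r2; ('\\' :: c2 :: p.1, p.2)
    else if c = q then ([q], r)
    else let p := pvStrScan q r; (c :: p.1, p.2)

-- port of Source B's block-comment handling: find '*/' and build the space/newline fill in one pass
def pvBlockScan : List Char → List Char × List Char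
  | [] => ([], [])
  | [c] => ([if c = '\n' then '\n' else ' '], [])
  | c :: c2 :: r =>
    if c = '*' ∧ c2 = '/' then ([' ', ' '], r)
    else
      let p := pvBlockScan (c2 :: r)
      ((if c = '\n' then '\n' else ' ') :: p.1, p.2)
termination_by cs => cs.length

theorem pvStrScan_snd_le (q : Char) (cs : List Char) : (pvStrScan q cs).2.length ≤ cs.length := by
  induction cs using pvStrScan.induct q with
  | case1 => simp [pvStrScan]
  | case2 => simp [pvStrScan]
  | case3 c2 r2 ih => simp [pvStrScan]; omega
  | case4 r2 h => rw [pvStrScan.eq_def]; simp [h]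
  | case5 c2 r2 h1 h2 ih => rw [pvStrScan.eq_def]; simp [h1, h2]; omega

theorem pvBlockScan_snd_le (cs : List Char) : (pvBlockScan cs).2.length ≤ cs.length := by
  induction cs using pvBlockScan.induct with
  | case1 => simp [pvBlockScan]
  | case2 c => simp [pvBlockScan]
  | case3 c c2 r h => rw [pvBlockScan.eq_def]; simp [h]; omega
  | case4 c c2 r h ih =>
    rw [pvBlockScan.eq_def]
    simp only [h, if_false]
    exact ih.trans (by simp)

-- Source B's chunk loop: copy the run before the next delimiter verbatim, then dispatch
mutual
def pvStrip (cs : List Char) : List Char :=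
  cs.takeWhile (fun c => !pvDelim c) ++ pvDispatch (cs.dropWhile (fun c => !pvDelim c))
termination_by (cs.length, 1)
decreasing_by
  have := List.length_dropWhile_le (p := fun c => !pvDelim c) (l := cs)
  simp [Prod.lex_iff]
  omega

-- dispatch on the delimiter found (head of the remainder); mirrors Source B's startswith branches
def pvDispatch : List Char → List Char
  | [] => []
  | c :: r =>
    if c = '/' then
      if r.head? = some '/' then
        ' ' :: ' ' :: ((r.tail.takeWhile (fun x => !(x == '\n'))).map (fun _ => ' ') ++
          pvAfterLine (r.tail.dropWhile (fun x => !(x == '\n'))))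
      else if r.head? = some '*' then
        ' ' :: ' ' :: ((pvBlockScan r.tail).1 ++ pvStrip (pvBlockScan r.tail).2)
      else '/' :: pvStrip r
    else
      c :: ((pvStrScan c r).1 ++ pvStrip (pvStrScan c r).2)
termination_by cs => (cs.length, 0)
decreasing_by
  · have h1 := List.length_dropWhile_le (p := fun x => !(x == '\n')) (l := r.tail)
    have h2 : r.tail.length ≤ r.length := by simp [List.length_tail]
    simp [Prod.lex_iff]
    omega
  · have h1 := pvBlockScan_snd_le r.tail
    have h2 : r.tail.length ≤ r.length := by simp [List.length_tail]
    simp [Prod.lex_iff]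
    omega
  · simp [Prod.lex_iff]
  · have := pvStrScan_snd_le c r
    simp [Prod.lex_iff]
    omega

-- keep the newline that ends a line comment, then resume the chunk loop
def pvAfterLine : List Char → List Char
  | '\n' :: r3 => '\n' :: pvStrip r3
  | _ => []
termination_by cs => (cs.length, 0)
decreasing_by
  simp [Prod.lex_iff]
end

def strip_js_comments_py_alt (text : String) : String :=
  String.mk (pvStrip text.toList)

-- ===== PRECONDITION & SPEC =====
def Spec_strip_js_comments_py (text : String) (out : String) : Prop := out = strip_js_comments_py_alt text
instance (text : String) (out : String) : Decidable (Spec_strip_js_comments_py text out) := by unfold Spec_strip_js_comments_py; infer_instance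

-- ===== CLAIM (what is proved, stated in full; the proofs are below) =====
def Claim_equal_strip_js_comments_py : Prop := ∀ (text : String), Dom_strip_js_comments_py text → Spec_strip_js_comments_py text (strip_js_comments_py text)

-- ===== LEMMAS AND PROOFS =====

-- A in line-comment state: spaces until the newline, keep it, back to neutral state
theorem loopA_line (cs : List Char) :
    pvLoopA cs false false false true false false =
      (cs.takeWhile (fun x => !(x == '\n'))).map (fun _ => ' ') ++
        (match cs.dropWhile (fun x => !(x == '\n')) with
         | '\n' :: r3 => '\n' :: pvLoopA r3 false false false false false false
         | _ => []) := by
  induction cs with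
  | nil => simp [pvLoopA]
  | cons c cs ih =>
    by_cases hc : c = '\n'
    · subst hc; rw [pvLoopA]; simp [List.takeWhile_cons, List.dropWhile_cons]
    · rw [pvLoopA]
      have hb : (!(c == '\n')) = true := by simp [hc]
      simp [hc, List.takeWhile_cons, List.dropWhile_cons, hb, ih]

-- A in block-comment state computes pvBlockScan's fill and resumes neutral after '*/'
theorem loopA_block (cs : List Char) :
    pvLoopA cs false false false false true false =
      (pvBlockScan cs).1 ++ pvLoopA (pvBlockScan cs).2 false false false false false false := by
  induction cs using pvBlockScan.induct with
  | case1 => simp [pvLoopA, pvBlockScan]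
  | case2 c => rw [pvLoopA]; rw [pvBlockScan.eq_def]; simp [pvLoopA]
  | case3 c c2 r h =>
    obtain ⟨rfl, rfl⟩ := h
    rw [pvLoopA]; rw [pvBlockScan.eq_def]; simp
  | case4 c c2 r h ih =>
    rw [pvLoopA]; rw [pvBlockScan.eq_def]
    have hh : ¬(c = '*' ∧ (c2 :: r).head? = some '/') := by
      simpa using h
    simp [hh, h, ih]

-- A in single-quote state computes pvStrScan and resumes neutral after the closing quote
theorem loopA_single (cs : List Char) :
    pvLoopA cs true false false false false false =
      (pvStrScan '\'' cs).1 ++ pvLoopA (pvStrScan '\'' cs).2 false false false false false false := by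
  induction cs using pvStrScan.induct '\'' with
  | case1 => simp [pvLoopA, pvStrScan]
  | case2 => rw [pvLoopA]; simp [pvStrScan, pvLoopA]
  | case3 c2 r2 ih => rw [pvLoopA]; rw [pvLoopA]; simp [pvStrScan]; rw [pvLoopA]; simp [ih]
  | case4 r2 h => rw [pvLoopA]; rw [pvStrScan.eq_def]; simp
  | case5 c2 r2 h1 h2 ih => rw [pvLoopA]; rw [pvStrScan.eq_def]; simp [h1, h2, ih]

theorem loopA_double (cs : List Char) :
    pvLoopA cs false true false false false false =
      (pvStrScan '"' cs).1 ++ pvLoopA (pvStrScan '"' cs).2 false false false false false false := by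
  induction cs using pvStrScan.induct '"' with
  | case1 => simp [pvLoopA, pvStrScan]
  | case2 => rw [pvLoopA]; simp [pvStrScan, pvLoopA]
  | case3 c2 r2 ih => rw [pvLoopA]; rw [pvLoopA]; simp [pvStrScan]; rw [pvLoopA]; simp [ih]
  | case4 r2 h => rw [pvLoopA]; rw [pvStrScan.eq_def]; simp
  | case5 c2 r2 h1 h2 ih => rw [pvLoopA]; rw [pvStrScan.eq_def]; simp [h1, h2, ih]

theorem loopA_template (cs : List Char) :
    pvLoopA cs false false true false false false =
      (pvStrScan '`' cs).1 ++ pvLoopA (pvStrScan '`' cs).2 false false false false false false := by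
  induction cs using pvStrScan.induct '`' with
  | case1 => simp [pvLoopA, pvStrScan]
  | case2 => rw [pvLoopA]; simp [pvStrScan, pvLoopA]
  | case3 c2 r2 ih => rw [pvLoopA]; rw [pvLoopA]; simp [pvStrScan]; rw [pvLoopA]; simp [ih]
  | case4 r2 h => rw [pvLoopA]; rw [pvStrScan.eq_def]; simp
  | case5 c2 r2 h1 h2 ih => rw [pvLoopA]; rw [pvStrScan.eq_def]; simp [h1, h2, ih]

-- A in neutral state copies a delimiter-free run verbatim
theorem loopA_run (run rest : List Char) (h : ∀ c ∈ run, pvDelim c = false) :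
    pvLoopA (run ++ rest) false false false false false false =
      run ++ pvLoopA rest false false false false false false := by
  induction run with
  | nil => simp
  | cons c run ih =>
    have hc := h c (by simp)
    have h1 : ¬c = '/' := by intro e; rw [e] at hc; simp [pvDelim] at hc
    have h2 : ¬c = '\'' := by intro e; rw [e] at hc; simp [pvDelim] at hc
    have h3 : ¬c = '"' := by intro e; rw [e] at hc; simp [pvDelim] at hc
    have h4 : ¬c = '`' := by intro e; rw [e] at hc; simp [pvDelim] at hc
    rw [List.cons_append, pvLoopA]
    simp [h1, h2, h3, h4]
    exact ih (fun x hx => h x (by simp [hx]))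

theorem pvDropWhile_cons_lt {p : Char → Bool} {l r : List Char} {c : Char}
    (h : l.dropWhile p = c :: r) : r.length < l.length := by
  have := List.length_dropWhile_le (p := p) (l := l)
  rw [h] at this; simp at this; omega

theorem pvDropWhile_not_head {p : Char → Bool} {l r : List Char} {c : Char}
    (h : l.dropWhile p = c :: r) : p c = false := by
  induction l with
  | nil => simp at h
  | cons a l ih =>
    rw [List.dropWhile] at h
    by_cases hp : p a
    · simp [hp] at h; exact ih h
    · simp [hp] at h; obtain ⟨rfl, _⟩ := h; simpa using hp

-- neutral-state step lemmas at each delimiter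
theorem loopA_step_lineStart (r2 : List Char) :
    pvLoopA ('/' :: '/' :: r2) false false false false false false =
      ' ' :: ' ' :: pvLoopA r2 false false false true false false := by
  rw [pvLoopA]; simp

theorem loopA_step_blockStart (r2 : List Char) :
    pvLoopA ('/' :: '*' :: r2) false false false false false false =
      ' ' :: ' ' :: pvLoopA r2 false false false false true false := by
  rw [pvLoopA]; simp

theorem loopA_step_slash (r : List Char) (h1 : r.head? ≠ some '/') (h2 : r.head? ≠ some '*') :
    pvLoopA ('/' :: r) false false false false false false =
      '/' :: pvLoopA r false false false false false false := by
  rw [pvLoopA]; simp [h1, h2]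

theorem loopA_step_single (r : List Char) :
    pvLoopA ('\'' :: r) false false false false false false =
      '\'' :: pvLoopA r true false false false false false := by
  rw [pvLoopA]; simp

theorem loopA_step_double (r : List Char) :
    pvLoopA ('"' :: r) false false false false false false =
      '"' :: pvLoopA r false true false false false false := by
  rw [pvLoopA]; simp

theorem loopA_step_template (r : List Char) :
    pvLoopA ('`' :: r) false false false false false false =
      '`' :: pvLoopA r false false true false false false := by
  rw [pvLoopA]; simp

theorem loopA_eq_strip_aux (n : Nat) :
    ∀ cs : List Char, cs.length ≤ n →
      pvLoopA cs false false false false false false = pvStrip cs := by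
  induction n with
  | zero =>
    intro cs h
    have hcs : cs = [] := by cases cs <;> simp_all
    subst hcs
    rw [pvStrip]; simp [pvLoopA, pvDispatch]
  | succ n ih =>
    intro cs hlen
    have hsplit := List.takeWhile_append_dropWhile (p := fun c => !pvDelim c) (l := cs)
    have hrunf : ∀ c ∈ cs.takeWhile (fun c => !pvDelim c), pvDelim c = false := by
      intro c hcmem
      simpa using List.mem_takeWhile_imp hcmem
    conv_lhs => rw [← hsplit]
    rw [loopA_run _ _ hrunf, pvStrip]
    congr 1
    cases hrest : cs.dropWhile (fun c => !pvDelim c) with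
    | nil => simp [pvLoopA, pvDispatch]
    | cons c r =>
      have hlenr : r.length < cs.length := pvDropWhile_cons_lt hrest
      have hc : pvDelim c = true := by simpa using pvDropWhile_not_head hrest
      have hc4 : c = '/' ∨ c = '\'' ∨ c = '"' ∨ c = '`' := by
        simp [pvDelim] at hc; tauto
      rcases hc4 with hc | hc | hc | hc
      · subst hc
        cases r with
        | nil =>
          rw [loopA_step_slash _ (by simp) (by simp), pvDispatch.eq_def]
          simp [pvLoopA, pvStrip, pvDispatch]
        | cons c2 r2 =>
          by_cases h2 : c2 = '/'
          · subst h2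
            rw [loopA_step_lineStart, pvDispatch.eq_def]
            simp only [List.head?_cons, List.tail_cons]
            rw [loopA_line]
            congr 1
            congr 1
            cases hd : r2.dropWhile (fun x => !(x == '\n')) with
            | nil => rw [pvAfterLine.eq_def]
            | cons c3 r3 =>
              have hc3 : c3 = '\n' := by
                have := pvDropWhile_not_head hd
                simpa using this
              subst hc3
              have hr3 : r3.length ≤ n := by
                have hlt := pvDropWhile_cons_lt hd
                simp at hlenr
                omega
              rw [pvAfterLine]
              simp [ih r3 hr3]
          · by_cases h3 : c2 = '*'
            · subst h3
              rw [loopA_step_blockStart, pvDispatch.eq_def]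
              simp only [List.head?_cons, List.tail_cons]
              norm_num
              rw [loopA_block]
              have hb : (pvBlockScan r2).2.length ≤ n := by
                have := pvBlockScan_snd_le r2
                simp at hlenr
                omega
              simp [ih _ hb]
            · rw [loopA_step_slash _ (by simp [h2]) (by simp [h3]), pvDispatch.eq_def]
              simp [h2, h3]
              exact ih _ (by simp at hlenr ⊢; omega)
      · subst hc
        rw [loopA_step_single, pvDispatch.eq_def]
        simp only []
        norm_num
        rw [loopA_single]
        have hs : (pvStrScan '\'' r).2.length ≤ n := by
          have := pvStrScan_snd_le '\'' r
          omega
        simp [ih _ hs]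
      · subst hc
        rw [loopA_step_double, pvDispatch.eq_def]
        simp only []
        norm_num
        rw [loopA_double]
        have hs : (pvStrScan '"' r).2.length ≤ n := by
          have := pvStrScan_snd_le '"' r
          omega
        simp [ih _ hs]
      · subst hc
        rw [loopA_step_template, pvDispatch.eq_def]
        simp only []
        norm_num
        rw [loopA_template]
        have hs : (pvStrScan '`' r).2.length ≤ n := by
          have := pvStrScan_snd_le '`' r
          omega
        simp [ih _ hs]

theorem loopA_eq_strip (cs : List Char) :
    pvLoopA cs false false false false false false = pvStrip cs :=
  loopA_eq_strip_aux cs.length cs le_rfl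

-- ===== VERDICT (by name: the statement is the Claim_ definition above) =====
theorem strip_js_comments_py_spec : Claim_equal_strip_js_comments_py := by
  intro text _
  unfold Spec_strip_js_comments_py strip_js_comments_py strip_js_comments_py_alt
  rw [loopA_eq_strip]
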